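-- pv_equiv track=rewrite | github.com/wookdoop2/Algorithm-study | programmers/level1/비밀지도.py | solution
-- ===== SOURCE A (Python) =====
-- def solution(n, arr1, arr2):
--     answer = []
--     # num = bin(arr1[1])
--     # num = list(num)
--     for i in range(0, n):
--         answer_ = []
--         _answer_ = []
--         num1 = list(format(arr1[i], 'b'))
--         num2 = list(format(arr2[i], 'b'))
--         if len(num1) != n:
--             for a in range(n - len(num1)):
--                 num1.insert(a, '0')
--         if len(num2) != n:
--             for b in range(n - len(num2)):
--                 num2.insert(b, '0')
--         for j in range(0, n):
--             answer_.append(int(num1[j]) | int(num2[j]))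
--         for k in answer_:
--             if k == 1:
--                 _answer_.append('#')
--             else:
--                 _answer_.append(' ')
--         answer.append(''.join(_answer_))
--     return answer
-- ===== SOURCE B (Python) =====
-- def solution(n, arr1, arr2):
--     # One integer OR per row, then a zero-padded binary format and a character translation.
--     width = '0{}b'.format(n)
--     table = {48: ' ', 49: '#'}
--     return [format(arr1[i] | arr2[i], width).translate(table) for i in range(n)]
-- ===== Notes on version B (the rewrite author's own statement) =====
-- stated objective: simpler
-- what changed: B replaces A's per-bit string loops (manual zero-insertion padding of each operand, per-character int()|int() OR, and a char-mapping loop) with one integer OR per row followed by a single zero-padded binary format and a str.translate.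
-- outside the precondition, e.g. on solution(2, [4, 1], [1, 1]): A returns ['##', ' #'], B returns ['# #', ' #']
import Mathlib
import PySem

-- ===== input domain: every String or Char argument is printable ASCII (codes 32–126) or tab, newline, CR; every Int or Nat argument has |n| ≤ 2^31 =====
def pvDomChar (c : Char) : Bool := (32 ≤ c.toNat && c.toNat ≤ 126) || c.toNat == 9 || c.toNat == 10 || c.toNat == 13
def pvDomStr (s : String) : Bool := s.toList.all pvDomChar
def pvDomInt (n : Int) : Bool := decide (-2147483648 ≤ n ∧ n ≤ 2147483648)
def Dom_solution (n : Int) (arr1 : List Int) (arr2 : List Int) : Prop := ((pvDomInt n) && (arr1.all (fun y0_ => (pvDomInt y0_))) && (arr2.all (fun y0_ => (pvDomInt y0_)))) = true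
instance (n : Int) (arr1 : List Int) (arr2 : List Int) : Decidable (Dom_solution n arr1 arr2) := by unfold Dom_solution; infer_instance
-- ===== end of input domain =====

-- B replaces A's per-bit string loops by one integer OR per row plus one zero-padded
-- binary format and a character translation (objective: simpler).

-- ===== PORT A =====

-- int(c) on a one-character string; exact on digit chars (others raise ValueError in Python, outside Pre_)
def pvIntOfChar (c : Char) : Int := (PySem.Int.ofStr? (String.mk [c])).getD 0

-- digit-accumulating loop behind format(x, 'b')
def pvBinGo (x : Nat) (acc : List Char) : List Char :=
  if h : x = 0 then acc
  else pvBinGo (x / 2) ((if x % 2 = 1 then '1' else '0') :: acc)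
termination_by x
decreasing_by exact Nat.div_lt_self (Nat.pos_of_ne_zero h) one_lt_two

-- format(x, 'b') as a char list; exact for x ≥ 0 (negative values are outside Pre_)
def pvFormatB (x : Int) : List Char :=
  if x.toNat = 0 then ['0'] else pvBinGo x.toNat []

def solution (n : Int) (arr1 : List Int) (arr2 : List Int) : List String :=
  (PySem.List.pyRange 0 n 1).foldl (fun answer i =>
    let num1 := pvFormatB (PySem.List.pyGetD arr1 i 0)
    let num2 := pvFormatB (PySem.List.pyGetD arr2 i 0)
    let num1 := if (num1.length : Int) ≠ n then
        (PySem.List.pyRange 0 (n - (num1.length : Int)) 1).foldl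
          (fun l a => PySem.List.insert l a '0') num1
      else num1
    let num2 := if (num2.length : Int) ≠ n then
        (PySem.List.pyRange 0 (n - (num2.length : Int)) 1).foldl
          (fun l b => PySem.List.insert l b '0') num2
      else num2
    let answer_ : List Int := (PySem.List.pyRange 0 n 1).foldl (fun acc j =>
        acc ++ [Int.lor (pvIntOfChar (PySem.List.pyGetD num1 j ' '))
                (pvIntOfChar (PySem.List.pyGetD num2 j ' '))]) []
    let under : List Char := answer_.foldl (fun acc k =>
        acc ++ [if k = 1 then '#' else ' ']) []
    answer ++ [String.mk under]) []

-- ===== PORT B =====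

-- format(x, '0{w}b'): zero-pad the binary form to width w; exact for x ≥ 0
def pvFormatPadB (w : Int) (x : Int) : List Char :=
  let s := pvFormatB x
  List.replicate (w.toNat - s.length) '0' ++ s

-- str.translate({48: ' ', 49: '#'})
def pvTranslate (c : Char) : Char := if c = '0' then ' ' else if c = '1' then '#' else c

def solution_alt (n : Int) (arr1 : List Int) (arr2 : List Int) : List String :=
  (PySem.List.pyRange 0 n 1).map (fun i =>
    String.mk ((pvFormatPadB n
      (Int.lor (PySem.List.pyGetD arr1 i 0) (PySem.List.pyGetD arr2 i 0))).map pvTranslate))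

-- ===== PRECONDITION & SPEC =====
-- Pre_ excludes inputs where A raises (n exceeding a list length: IndexError; a negative value
-- in an indexed row: ValueError from int('-')), and rows holding a value ≥ 2^n — a corner the
-- problem never specifies, where A accidentally keeps only the value's most-significant n bits
-- while B widens the row string; neither behaviour is the specified one.
def Pre_solution (n : Int) (arr1 : List Int) (arr2 : List Int) : Prop :=
  n ≤ (arr1.length : Int) ∧ n ≤ (arr2.length : Int) ∧
  (∀ x ∈ arr1.take n.toNat, 0 ≤ x ∧ x < (2 : Int) ^ n.toNat) ∧
  (∀ x ∈ arr2.take n.toNat, 0 ≤ x ∧ x < (2 : Int) ^ n.toNat)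
instance (n : Int) (arr1 : List Int) (arr2 : List Int) : Decidable (Pre_solution n arr1 arr2) := by
  unfold Pre_solution; infer_instance

def pvWitness_solution : Int × List Int × List Int := (2, [1, 2], [2, 1])

def Spec_solution (n : Int) (arr1 : List Int) (arr2 : List Int) (out : List String) : Prop :=
  out = solution_alt n arr1 arr2
instance (n : Int) (arr1 : List Int) (arr2 : List Int) (out : List String) :
    Decidable (Spec_solution n arr1 arr2 out) := by unfold Spec_solution; infer_instance

-- ===== CLAIM (what is proved, stated in full; the proofs are below) =====
def Claim_equal_solution : Prop := ∀ (n : Int) (arr1 : List Int) (arr2 : List Int),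
  Dom_solution n arr1 arr2 → Pre_solution n arr1 arr2 →
  Spec_solution n arr1 arr2 (solution n arr1 arr2)

-- ===== LEMMAS AND PROOFS =====

-- n-wide big-endian binary rendering (reference form used only in proofs)
def pvBsBE : Nat → Nat → List Char
  | 0, _ => []
  | (N + 1), x => pvBsBE N (x / 2) ++ [if x % 2 = 1 then '1' else '0']

theorem pvBsBE_length (N x : Nat) : (pvBsBE N x).length = N := by
  induction N generalizing x with
  | zero => rfl
  | succ N ih => simp [pvBsBE, ih]

theorem pvBinGo_acc (x : Nat) : ∀ acc : List Char, x ≠ 0 →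
    pvBinGo x acc = pvBinGo x [] ++ acc := by
  induction x using Nat.strong_induction_on with
  | _ x ih =>
    intro acc hx
    conv_lhs => rw [pvBinGo]
    conv_rhs => rw [pvBinGo]
    simp only [dif_neg hx]
    by_cases h2 : x / 2 = 0
    · have e : ∀ ac : List Char, pvBinGo (x / 2) ac = ac := by
        intro ac; rw [pvBinGo]; simp [h2]
      rw [e, e]
      rfl
    · rw [ih (x / 2) (Nat.div_lt_self (Nat.pos_of_ne_zero hx) one_lt_two)
          ((if x % 2 = 1 then '1' else '0') :: acc) h2,
        ih (x / 2) (Nat.div_lt_self (Nat.pos_of_ne_zero hx) one_lt_two)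
          [if x % 2 = 1 then '1' else '0'] h2]
      simp

-- proof-side name for format(x,'b') on a Nat
def pvBinN (x : Nat) : List Char := if x = 0 then ['0'] else pvBinGo x []

theorem pvFormatB_eq (x : Int) : pvFormatB x = pvBinN x.toNat := rfl

theorem pvBinN_0 : pvBinN 0 = ['0'] := rfl

theorem pvBinN_1 : pvBinN 1 = ['1'] := by
  show pvBinGo 1 [] = ['1']
  rw [pvBinGo]; norm_num; rw [pvBinGo]; simp

theorem pvBinN_step (x : Nat) (h : 2 ≤ x) :
    pvBinN x = pvBinN (x / 2) ++ [if x % 2 = 1 then '1' else '0'] := by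
  have hx : x ≠ 0 := by omega
  have h2 : x / 2 ≠ 0 := by omega
  unfold pvBinN
  simp only [hx, if_false, h2]
  conv_lhs => rw [pvBinGo]
  simp only [dif_neg hx]
  exact pvBinGo_acc (x / 2) _ h2

-- padding format(x,'b') to width N gives the N-wide rendering
theorem pvPadK (N : Nat) : ∀ x : Nat, x < 2 ^ N → 1 ≤ N →
    List.replicate (N - (pvBinN x).length) '0' ++ pvBinN x = pvBsBE N x := by
  induction N with
  | zero => intro x _ h; omega
  | succ N ih =>
    intro x hx _
    by_cases hN : N = 0
    · subst hN
      interval_cases x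
      · simp [pvBinN_0, pvBsBE]
      · simp [pvBinN_1, pvBsBE]
    · have hx2 : x / 2 < 2 ^ N := by
        have := Nat.pow_succ 2 N ▸ hx
        omega
      have ihx := ih (x / 2) hx2 (by omega)
      by_cases hge : 2 ≤ x
      · rw [pvBinN_step x hge]
        have hlen : (pvBinN (x / 2)).length ≤ N := by
          have := congrArg List.length ihx
          simp [pvBsBE_length] at this
          omega
        simp only [pvBsBE, List.length_append, List.length_cons, List.length_nil]
        rw [show N + 1 - ((pvBinN (x / 2)).length + 1) = N - (pvBinN (x / 2)).length by omega,
          ← List.append_assoc, ihx]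
      · -- x < 2 : x / 2 = 0
        have hdiv : x / 2 = 0 := by omega
        have hbx : pvBinN x = [if x % 2 = 1 then '1' else '0'] := by
          interval_cases x
          · simpa using pvBinN_0
          · simpa using pvBinN_1
        have hzeros : List.replicate N '0' = pvBsBE N 0 := by
          have := ihx
          rw [hdiv, pvBinN_0] at this
          simp only [List.length_cons, List.length_nil] at this
          rw [← this, ← List.replicate_succ']
          congr 1
          omega
        rw [hbx]
        simp only [List.length_cons, List.length_nil, Nat.add_sub_cancel]
        show _ = pvBsBE N (x / 2) ++ [if x % 2 = 1 then '1' else '0']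
        rw [hdiv, ← hzeros]

theorem pvDiv2_lor (a b : Nat) : (a ||| b) / 2 = a / 2 ||| b / 2 := by
  apply Nat.eq_of_testBit_eq
  intro i
  simp [Nat.testBit_div_two]

theorem pvMod2_lor (a b : Nat) : (a ||| b) % 2 = 1 ↔ (a % 2 = 1 ∨ b % 2 = 1) := by
  have := Nat.testBit_lor a b 0
  simpa [Nat.testBit_zero] using this

-- the zero-insertion padding loop prepends zeros
theorem pvPadFoldNat (k : Nat) (num : List Char) :
    (PySem.List.pyRange 0 (k : Int) 1).foldl (fun l a => PySem.List.insert l a '0') num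
      = List.replicate k '0' ++ num := by
  induction k with
  | zero => simp [PySem.List.pyRange_one_eq_nil]
  | succ k ih =>
    push_cast
    rw [PySem.List.pyRange_one_succ_right (by positivity), List.foldl_append]
    push_cast at ih
    rw [ih]
    simp only [List.foldl_cons, List.foldl_nil]
    rw [show (k : Int) = ((List.replicate k '0').length : Int) by simp,
      PySem.List.insert_natCast _ _ _ (by simp),
      List.take_left, List.drop_left]
    simp [List.replicate_succ']

theorem pvPadFold (m : Int) (num : List Char) :
    (PySem.List.pyRange 0 m 1).foldl (fun l a => PySem.List.insert l a '0') num
      = List.replicate m.toNat '0' ++ num := by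
  by_cases hm : 0 ≤ m
  · rw [← Int.toNat_of_nonneg hm]; exact pvPadFoldNat m.toNat num
  · have h0 : m ≤ 0 := by omega
    rw [PySem.List.pyRange_one_eq_nil h0]
    simp [Int.toNat_of_nonpos h0]

theorem pvIntOfChar_0 : pvIntOfChar '0' = 0 := by decide
theorem pvIntOfChar_1 : pvIntOfChar '1' = 1 := by decide

-- last char of the (N+1)-wide rendering, fetched by index N
theorem pvGetD_last (N x : Nat) :
    PySem.List.pyGetD (pvBsBE (N + 1) x) (N : Int) ' '
      = (if x % 2 = 1 then '1' else '0') := by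
  rw [PySem.List.pyGetD_natCast]
  show (pvBsBE N (x / 2) ++ [_]).getD N ' ' = _
  rw [List.getD_eq_getElem?_getD,
    List.getElem?_append_right (le_of_eq (pvBsBE_length N (x / 2)))]
  simp [pvBsBE_length]

theorem pvGetD_init (N x : Nat) (j : Int) (h0 : 0 ≤ j) (hj : j < (N : Int)) :
    PySem.List.pyGetD (pvBsBE (N + 1) x) j ' '
      = PySem.List.pyGetD (pvBsBE N (x / 2)) j ' ' := by
  have hlen : j.toNat < (pvBsBE N (x / 2)).length := by rw [pvBsBE_length]; omega
  rw [PySem.List.pyGetD_eq_getElem _ _ h0 (by simp [pvBsBE_length, pvBsBE]; omega),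
    PySem.List.pyGetD_eq_getElem _ _ h0 (by simp [pvBsBE_length]; omega)]
  show (pvBsBE N (x / 2) ++ [_])[j.toNat]'_ = _
  rw [List.getElem_append_left hlen]

-- per-row core: A's per-bit OR over the two padded strings equals B's translated rendering of the OR
set_option maxHeartbeats 1000000 in
theorem pvMapRow (N : Nat) : ∀ a b : Nat,
    (PySem.List.pyRange 0 (N : Int) 1).map (fun j =>
      if Int.lor (pvIntOfChar (PySem.List.pyGetD (pvBsBE N a) j ' '))
          (pvIntOfChar (PySem.List.pyGetD (pvBsBE N b) j ' ')) = 1 then '#' else ' ')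
    = (pvBsBE N (a ||| b)).map pvTranslate := by
  induction N with
  | zero => intro a b; simp [PySem.List.pyRange_one_eq_nil, pvBsBE]
  | succ N ih =>
    intro a b
    push_cast
    rw [PySem.List.pyRange_one_succ_right (by positivity), List.map_append]
    push_cast at ih
    show _ ++ [_] = _
    have hbs : pvBsBE (N + 1) (a ||| b)
        = pvBsBE N (a / 2 ||| b / 2) ++ [if (a ||| b) % 2 = 1 then '1' else '0'] := by
      show pvBsBE N ((a ||| b) / 2) ++ _ = _
      rw [pvDiv2_lor]
    rw [hbs, List.map_append]
    congr 1
    · rw [← ih (a / 2) (b / 2)]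
      apply List.map_congr_left
      intro j hj
      rw [PySem.List.mem_pyRange_one] at hj
      rw [pvGetD_init N a j hj.1 hj.2, pvGetD_init N b j hj.1 hj.2]
    · simp only [List.map_cons, List.map_nil]
      rw [pvGetD_last N a, pvGetD_last N b]
      rcases Nat.mod_two_eq_zero_or_one a with ha | ha <;>
        rcases Nat.mod_two_eq_zero_or_one b with hb | hb <;>
        · have hl := pvMod2_lor a b
          rw [ha, hb] at hl ⊢
          simp only [hl]
          rcases Nat.mod_two_eq_zero_or_one (a ||| b) with h | h <;>
            simp_all [pvIntOfChar_0, pvIntOfChar_1, pvTranslate] <;> decide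

-- Int-level bridge for |||
theorem pvInt_lor_toNat (a b : Int) (ha : 0 ≤ a) (hb : 0 ≤ b) :
    Int.lor a b = ((a.toNat ||| b.toNat : Nat) : Int) := by
  rw [← Int.toNat_of_nonneg ha, ← Int.toNat_of_nonneg hb]
  rfl

-- the padded operand in port A equals the N-wide rendering
theorem pvPaddedEq (n : Int) (x : Int) (hn : 1 ≤ n)
    (h0 : 0 ≤ x) (hx : x < (2 : Int) ^ n.toNat) :
    (if ((pvFormatB x).length : Int) ≠ n then
        (PySem.List.pyRange 0 (n - ((pvFormatB x).length : Int)) 1).foldl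
          (fun l a => PySem.List.insert l a '0') (pvFormatB x)
      else pvFormatB x) = pvBsBE n.toNat x.toNat := by
  have hc : (((2 : Nat) ^ n.toNat : Nat) : Int) = (2 : Int) ^ n.toNat := by push_cast; ring
  have hxN : x.toNat < 2 ^ n.toNat := by omega
  have hN1 : 1 ≤ n.toNat := by omega
  have hkey := pvPadK n.toNat x.toNat hxN hN1
  rw [pvFormatB_eq]
  split_ifs with h
  · rw [pvPadFold]
    have : (n - ((pvBinN x.toNat).length : Int)).toNat
        = n.toNat - (pvBinN x.toNat).length := by omega
    rw [this, hkey]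
  · have hlen : (pvBinN x.toNat).length = n.toNat := by omega
    rw [← hkey, hlen]
    simp

-- ===== VERDICT (by name: the statement is the Claim_ definition above) =====
theorem solution_spec : Claim_equal_solution := by
  intro n arr1 arr2 _ hpre
  obtain ⟨h1, h2, hp1, hp2⟩ := hpre
  unfold Spec_solution solution solution_alt
  rw [PySem.List.foldl_append_singleton_eq_map]
  simp only [List.nil_append]
  apply List.map_congr_left
  intro i hi
  rw [PySem.List.mem_pyRange_one] at hi
  obtain ⟨hi0, hin⟩ := hi
  have hn1 : 1 ≤ n := by omega
  -- the two row values
  set a := PySem.List.pyGetD arr1 i 0 with hadef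
  set b := PySem.List.pyGetD arr2 i 0 with hbdef
  have hamem : a ∈ arr1.take n.toNat := by
    rw [hadef, PySem.List.pyGetD_eq_getElem _ _ hi0 (by omega)]
    have hlt : i.toNat < (arr1.take n.toNat).length := by
      simp only [List.length_take]
      omega
    rw [show arr1[i.toNat]'(by omega) = (arr1.take n.toNat)[i.toNat]'hlt by
      rw [List.getElem_take]]
    exact List.getElem_mem hlt
  have hbmem : b ∈ arr2.take n.toNat := by
    rw [hbdef, PySem.List.pyGetD_eq_getElem _ _ hi0 (by omega)]
    have hlt : i.toNat < (arr2.take n.toNat).length := by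
      simp only [List.length_take]
      omega
    rw [show arr2[i.toNat]'(by omega) = (arr2.take n.toNat)[i.toNat]'hlt by
      rw [List.getElem_take]]
    exact List.getElem_mem hlt
  obtain ⟨ha0, haub⟩ := hp1 a hamem
  obtain ⟨hb0, hbub⟩ := hp2 b hbmem
  rw [pvPaddedEq n a hn1 ha0 haub, pvPaddedEq n b hn1 hb0 hbub]
  rw [PySem.List.foldl_append_singleton_eq_map, List.nil_append,
    PySem.List.foldl_append_singleton_eq_map, List.nil_append, List.map_map]
  congr 1
  -- reduce B's row to the rendering and apply the core lemma
  have hor0 : 0 ≤ Int.lor a b := by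
    rw [pvInt_lor_toNat a b ha0 hb0]; positivity
  have horln : (Int.lor a b).toNat = a.toNat ||| b.toNat := by
    rw [pvInt_lor_toNat a b ha0 hb0]; simp
  have hc : (((2 : Nat) ^ n.toNat : Nat) : Int) = (2 : Int) ^ n.toNat := by push_cast; ring
  have horlt : a.toNat ||| b.toNat < 2 ^ n.toNat := by
    apply Nat.or_lt_two_pow <;> omega
  have hBpad : pvFormatPadB n (Int.lor a b) = pvBsBE n.toNat (a.toNat ||| b.toNat) := by
    unfold pvFormatPadB
    rw [pvFormatB_eq, horln]
    exact pvPadK n.toNat _ horlt (by omega)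
  rw [hBpad, ← pvMapRow n.toNat a.toNat b.toNat,
    show ((n.toNat : Nat) : Int) = n by omega]
  rfl
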